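-- pv_equiv track=rewrite | github.com/Arnabs-ops/studbotty | tools/viz.py | _validate_mermaid_code
-- ===== SOURCE A (Python) =====
-- def _validate_mermaid_code(code: str) -> tuple[bool, str]:
--     """Validate Mermaid code and return (is_valid, error_message)"""
--     if not code:
--         return False, "Empty code provided"
--
--     if not code.startswith('graph'):
--         return False, "Missing graph declaration"
--
--     # Check for balanced brackets and braces
--     bracket_count = 0
--     brace_count = 0
--     paren_count = 0
--
--     for char in code:
--         if char == '[':
--             bracket_count += 1
--         elif char == ']':
--             bracket_count -= 1
--         elif char == '{':
--             brace_count += 1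
--         elif char == '}':
--             brace_count -= 1
--         elif char == '(':
--             paren_count += 1
--         elif char == ')':
--             paren_count -= 1
--
--         # Early exit if any count goes negative (unmatched closing)
--         if bracket_count < 0 or brace_count < 0 or paren_count < 0:
--             return False, "Unmatched brackets, braces, or parentheses"
--
--     # Check if all counts are balanced
--     if bracket_count != 0 or brace_count != 0 or paren_count != 0:
--         return False, "Unbalanced brackets, braces, or parentheses"
--
--     return True, ""
-- ===== SOURCE B (Python) =====
-- def _validate_mermaid_code(code: str) -> tuple[bool, str]:
--     """Validate Mermaid code and return (is_valid, error_message)"""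
--     if not code:
--         return False, "Empty code provided"
--     if not code.startswith('graph'):
--         return False, "Missing graph declaration"
--
--     unmatched = False
--     unbalanced = False
--     for opener, closer in {'[': ']', '{': '}', '(': ')'}.items():
--         bal = 0
--         neg = False
--         for ch in code:
--             if ch == opener:
--                 bal += 1
--             elif ch == closer:
--                 bal -= 1
--             neg = neg or bal < 0
--         unmatched = unmatched or neg
--         unbalanced = unbalanced or bal != 0
--
--     if unmatched:
--         return False, "Unmatched brackets, braces, or parentheses"
--     if unbalanced:
--         return False, "Unbalanced brackets, braces, or parentheses"
--     return True, ""
-- ===== Notes on version B (the rewrite author's own statement) =====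
-- stated objective: alternative
-- what changed: Replaces A's single interleaved loop over three counters with early exit by three independent per-bracket-type scans, each tracking a running balance and a sticky went-negative flag, combined afterwards.
import Mathlib
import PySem

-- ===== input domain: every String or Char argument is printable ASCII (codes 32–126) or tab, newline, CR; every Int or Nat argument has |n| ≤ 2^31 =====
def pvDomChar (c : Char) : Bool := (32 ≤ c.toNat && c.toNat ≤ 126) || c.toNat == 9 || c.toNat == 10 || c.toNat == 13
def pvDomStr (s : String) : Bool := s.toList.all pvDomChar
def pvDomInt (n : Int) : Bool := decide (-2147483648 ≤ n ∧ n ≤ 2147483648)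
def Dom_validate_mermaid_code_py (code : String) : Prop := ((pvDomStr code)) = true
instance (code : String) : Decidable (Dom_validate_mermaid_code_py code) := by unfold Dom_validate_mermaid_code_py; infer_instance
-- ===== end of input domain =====

-- ===== PORT A =====
-- Header: B replaces A's single interleaved counting loop (early exit) by three
-- independent per-pair scans (running balance + sticky negative flag), combined after.
def pvLoopA : Int → Int → Int → List Char → Bool × String
  | b, r, p, [] =>
    if b ≠ 0 || r ≠ 0 || p ≠ 0 then (false, "Unbalanced brackets, braces, or parentheses")
    else (true, "")
  | b, r, p, ch :: cs =>
    let b' := if ch = '[' then b + 1 else if ch = ']' then b - 1 else b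
    let r' := if ch = '{' then r + 1 else if ch = '}' then r - 1 else r
    let p' := if ch = '(' then p + 1 else if ch = ')' then p - 1 else p
    if b' < 0 || r' < 0 || p' < 0 then (false, "Unmatched brackets, braces, or parentheses")
    else pvLoopA b' r' p' cs

def validate_mermaid_code_py (code : String) : Bool × String :=
  if code.toList = [] then (false, "Empty code provided")
  else if ¬ PySem.Str.startswith code "graph" then (false, "Missing graph declaration")
  else pvLoopA 0 0 0 code.toList

-- ===== PORT B =====
-- one per-pair scan: running balance, sticky "ever went negative" flag
def pvScanStep (o c : Char) (s : Int × Bool) (ch : Char) : Int × Bool :=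
  let bal := if ch = o then s.1 + 1 else if ch = c then s.1 - 1 else s.1
  (bal, s.2 || decide (bal < 0))

def validate_mermaid_code_py_alt (code : String) : Bool × String :=
  if code.toList = [] then (false, "Empty code provided")
  else if ¬ PySem.Str.startswith code "graph" then (false, "Missing graph declaration")
  else
    let flags := [('[', ']'), ('{', '}'), ('(', ')')].foldl
      (fun (acc : Bool × Bool) pr =>
        let s := code.toList.foldl (pvScanStep pr.1 pr.2) (0, false)
        (acc.1 || s.2, acc.2 || decide (s.1 ≠ 0))) (false, false)
    if flags.1 then (false, "Unmatched brackets, braces, or parentheses")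
    else if flags.2 then (false, "Unbalanced brackets, braces, or parentheses")
    else (true, "")

-- ===== PRECONDITION & SPEC =====
def Spec_validate_mermaid_code_py (code : String) (out : Bool × String) : Prop := out = validate_mermaid_code_py_alt code
instance (code : String) (out : Bool × String) : Decidable (Spec_validate_mermaid_code_py code out) := by unfold Spec_validate_mermaid_code_py; infer_instance

-- ===== CLAIM (what is proved, stated in full; the proofs are below) =====
def Claim_equal_validate_mermaid_code_py : Prop := ∀ (code : String), Dom_validate_mermaid_code_py code → Spec_validate_mermaid_code_py code (validate_mermaid_code_py code)

-- ===== LEMMAS AND PROOFS =====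

theorem pvScan_sticky (o c : Char) (cs : List Char) (bal : Int) :
    (cs.foldl (pvScanStep o c) (bal, true)).2 = true := by
  induction cs generalizing bal with
  | nil => rfl
  | cons ch cs ih => simpa [List.foldl, pvScanStep] using ih _

theorem pvLoopA_eq_scans (cs : List Char) : ∀ (b r p : Int), 0 ≤ b → 0 ≤ r → 0 ≤ p →
    pvLoopA b r p cs =
      (let sb := cs.foldl (pvScanStep '[' ']') (b, false)
       let sr := cs.foldl (pvScanStep '{' '}') (r, false)
       let sp := cs.foldl (pvScanStep '(' ')') (p, false)
       if sb.2 || sr.2 || sp.2 then (false, "Unmatched brackets, braces, or parentheses")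
       else if sb.1 ≠ 0 || sr.1 ≠ 0 || sp.1 ≠ 0 then
         (false, "Unbalanced brackets, braces, or parentheses")
       else (true, "")) := by
  induction cs with
  | nil => intro b r p _ _ _; simp [pvLoopA, List.foldl]
  | cons ch cs ih =>
    intro b r p hb hr hp
    simp only [pvLoopA, List.foldl]
    set b' := if ch = '[' then b + 1 else if ch = ']' then b - 1 else b with hb'
    set r' := if ch = '{' then r + 1 else if ch = '}' then r - 1 else r with hr'
    set p' := if ch = '(' then p + 1 else if ch = ')' then p - 1 else p with hp'
    have hstep : ∀ o c (x : Int), pvScanStep o c (x, false) ch =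
        ((if ch = o then x + 1 else if ch = c then x - 1 else x),
         decide ((if ch = o then x + 1 else if ch = c then x - 1 else x) < 0)) := by
      intro o c x; simp [pvScanStep]
    by_cases hneg : b' < 0 ∨ r' < 0 ∨ p' < 0
    · have hone : (cs.foldl (pvScanStep '[' ']') (pvScanStep '[' ']' (b, false) ch)).2 = true ∨
          (cs.foldl (pvScanStep '{' '}') (pvScanStep '{' '}' (r, false) ch)).2 = true ∨
          (cs.foldl (pvScanStep '(' ')') (pvScanStep '(' ')' (p, false) ch)).2 = true := by
        rcases hneg with h | h | h
        · left; rw [hstep]; rw [← hb'] ; simp [h, pvScan_sticky]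
        · right; left; rw [hstep]; rw [← hr'] ; simp [h, pvScan_sticky]
        · right; right; rw [hstep]; rw [← hp'] ; simp [h, pvScan_sticky]
      have hcond : (b' < 0 || r' < 0 || p' < 0) = true := by
        rcases hneg with h | h | h <;> simp [h]
      rw [if_pos hcond]
      rcases hone with h | h | h <;> simp [h]
    · push Not at hneg
      obtain ⟨h1, h2, h3⟩ := hneg
      have hcond : ¬ ((b' < 0 || r' < 0 || p' < 0) = true) := by simp; omega
      rw [if_neg hcond]
      have e1 : decide (b' < 0) = false := by simp; omega
      have e2 : decide (r' < 0) = false := by simp; omega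
      have e3 : decide (p' < 0) = false := by simp; omega
      simp only [hstep, ← hb', ← hr', ← hp', e1, e2, e3]
      exact ih b' r' p' (by omega) (by omega) (by omega)

-- ===== VERDICT (by name: the statement is the Claim_ definition above) =====
theorem validate_mermaid_code_py_spec : Claim_equal_validate_mermaid_code_py := by
  intro code _
  unfold Spec_validate_mermaid_code_py validate_mermaid_code_py validate_mermaid_code_py_alt
  by_cases h1 : code.toList = []
  · simp [h1]
  · rw [if_neg h1, if_neg h1]
    by_cases h2 : ¬ PySem.Str.startswith code "graph"
    · rw [if_pos h2, if_pos h2]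
    · rw [if_neg h2, if_neg h2]
      rw [pvLoopA_eq_scans code.toList 0 0 0 le_rfl le_rfl le_rfl]
      simp [List.foldl]
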